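-- pv_equiv track=rewrite | github.com/mlevy34/CLASSES-AND-OBJECTS-MICHELLE-LEVY | main (2).py | count_partial
-- ===== SOURCE A (Python) =====
-- def count_partial(code : str, guess : str)->int:
--     """
--     Counts digits that are correct but in the wrong position.
--
--     Args:
--         code (str): The secret code.
--         guess (str): The player's guess.
--
--     Returns:
--         int: Number of partial matches.
--     """
--     count = 0
--     secrets = list(code)
--     guesses = list(guess)
--
--     if len(guesses) == 0:
--         return 0
--     else:
--         for i in range(len(guesses)):
--             if guesses[i] == secrets[i]:
--                 guesses[i] = None
--                 secrets[i] = None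
--
--         for i in range(len(guess)):
--             if guesses[i] is not None:
--                 if guesses[i] in secrets:
--                     count += 1
--                     secrets[secrets.index(guesses[i])] = None
--
--         return count
-- ===== SOURCE B (Python) =====
-- def count_partial(code: str, guess: str) -> int:
--     exact = sum(1 for i in range(len(guess)) if code[i] == guess[i])
--     total = sum(min(code.count(d), guess.count(d)) for d in set(guess))
--     return total - exact
-- ===== Notes on version B (the rewrite author's own statement) =====
-- stated objective: faster
-- what changed: Replaces A's None-marking of exact matches followed by a greedy membership-and-index-removal pass over the secrets list with the closed identity: (sum over distinct guess digits of min of the two character counts) minus the number of exact positional matches.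
import Mathlib
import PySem

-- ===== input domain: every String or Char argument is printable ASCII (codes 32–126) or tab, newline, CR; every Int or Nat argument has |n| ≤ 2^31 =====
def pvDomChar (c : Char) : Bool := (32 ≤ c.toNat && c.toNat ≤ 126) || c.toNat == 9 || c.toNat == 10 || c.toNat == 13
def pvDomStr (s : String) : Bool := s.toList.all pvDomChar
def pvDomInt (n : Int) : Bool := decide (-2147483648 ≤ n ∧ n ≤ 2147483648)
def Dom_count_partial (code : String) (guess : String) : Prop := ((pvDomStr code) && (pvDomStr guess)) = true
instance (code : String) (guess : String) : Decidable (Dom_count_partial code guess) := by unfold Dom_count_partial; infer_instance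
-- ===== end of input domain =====

-- B replaces A's None-marking plus greedy index-removal by the identity
-- "common digits (sum of min counts) minus exact positional matches"; equivalence is about the return value.

-- ===== PORT A =====
-- first loop: mark exact matches with none (Python: guesses[i] = None; secrets[i] = None)
def pvStep1 (sg : List (Option Char) × List (Option Char)) (i : Nat) :
    List (Option Char) × List (Option Char) :=
  if sg.2.getD i none = sg.1.getD i none then (sg.1.set i none, sg.2.set i none) else sg

-- second loop: greedy count, removing the first occurrence from secrets (list.index → PySem.List.index?)
def pvStep2 (g : List (Option Char)) (sc : List (Option Char) × Int) (i : Nat) :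
    List (Option Char) × Int :=
  match g.getD i none with
  | none => sc
  | some d =>
    if some d ∈ sc.1 then
      match PySem.List.index? sc.1 (some d) with
      | some j => (sc.1.set j none, sc.2 + 1)
      | none => sc
    else sc

def count_partial (code : String) (guess : String) : Int :=
  let secrets := code.toList.map some
  let guesses := guess.toList.map some
  if guesses.length = 0 then 0
  else
    let p := (List.range guesses.length).foldl pvStep1 (secrets, guesses)
    ((List.range guess.toList.length).foldl (pvStep2 p.2) (p.1, 0)).2

-- ===== PORT B =====
def count_partial_alt (code : String) (guess : String) : Int :=
  let cs := code.toList
  let gs := guess.toList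
  let exact : Int := ((List.range gs.length).countP (fun i => cs[i]? == gs[i]?) : Nat)
  let total : Int :=
    (PySem.Set.ofList gs).foldl (fun acc d => acc + ((min (cs.count d) (gs.count d) : Nat) : Int)) 0
  total - exact

-- ===== PRECONDITION & SPEC =====
-- Pre_ excludes exactly the inputs where Python A raises IndexError (code shorter than guess, guess nonempty);
-- Python B raises there too.
def Pre_count_partial (code : String) (guess : String) : Prop :=
  guess.toList.length ≤ code.toList.length
instance (code : String) (guess : String) : Decidable (Pre_count_partial code guess) := by
  unfold Pre_count_partial; infer_instance
def pvWitness_count_partial : String × String := ("1231", "321")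

def Spec_count_partial (code : String) (guess : String) (out : Int) : Prop := out = count_partial_alt code guess
instance (code : String) (guess : String) (out : Int) : Decidable (Spec_count_partial code guess out) := by unfold Spec_count_partial; infer_instance

-- ===== CLAIM (what is proved, stated in full; the proofs are below) =====
def Claim_equal_count_partial : Prop := ∀ (code : String) (guess : String), Dom_count_partial code guess → Pre_count_partial code guess → Spec_count_partial code guess (count_partial code guess)

-- ===== LEMMAS AND PROOFS =====

-- multiset of actually-present characters of an Option Char list
def pvMS (s : List (Option Char)) : Multiset Char := (s.filterMap id : List Char)

-- structural version of A's first loop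
def pvPhase1 : List (Option Char) → List (Option Char) → List (Option Char) × List (Option Char)
  | s, [] => (s, [])
  | [], x :: g => ([], x :: g)
  | c :: s, x :: g =>
    let p := pvPhase1 s g
    if x = c then (none :: p.1, none :: p.2) else (c :: p.1, x :: p.2)

-- structural version of A's second loop
def pvPhase2 : List (Option Char) → List (Option Char) → List (Option Char) × Int
  | s, [] => (s, 0)
  | s, none :: g => pvPhase2 s g
  | s, some d :: g =>
    if some d ∈ s then
      match PySem.List.index? s (some d) with
      | some j => let p := pvPhase2 (s.set j none) g; (p.1, p.2 + 1)
      | none => pvPhase2 s g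
    else pvPhase2 s g

-- multiset of characters at exactly-matching positions
def pvEm : List Char → List Char → Multiset Char
  | c :: cs, x :: gs => if x = c then c ::ₘ pvEm cs gs else pvEm cs gs
  | _, _ => 0

-- (c ::ₘ m) - E = c ::ₘ (m - E) when E ≤ m
theorem pv_cons_sub {m E : Multiset Char} (c : Char) (h : E ≤ m) :
    (c ::ₘ m) - E = c ::ₘ (m - E) := by
  ext a
  have := Multiset.le_iff_count.mp h a
  simp only [Multiset.count_sub, Multiset.count_cons]
  split <;> omega

-- (A - E) ∩ (B - E) = (A ∩ B) - E when E ≤ A and E ≤ B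
theorem pv_sub_inter_sub {A B E : Multiset Char} (hA : E ≤ A) (hB : E ≤ B) :
    (A - E) ∩ (B - E) = (A ∩ B) - E := by
  ext a
  have h1 := Multiset.le_iff_count.mp hA a
  have h2 := Multiset.le_iff_count.mp hB a
  simp only [Multiset.count_inter, Multiset.count_sub]
  omega

theorem pvStep1_shift (l : List Nat) (c x : Option Char)
    (s g : List (Option Char)) :
    (l.map Nat.succ).foldl pvStep1 (c :: s, x :: g) =
      ((l.foldl pvStep1 (s, g)).1.cons c, (l.foldl pvStep1 (s, g)).2.cons x) := by
  induction l generalizing s g with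
  | nil => rfl
  | cons i l ih =>
    simp only [List.map_cons, List.foldl_cons]
    have hstep : pvStep1 (c :: s, x :: g) (i + 1) =
        ((pvStep1 (s, g) i).1.cons c, (pvStep1 (s, g) i).2.cons x) := by
      simp only [pvStep1, List.getD_cons_succ, List.set_cons_succ]
      split <;> rfl
    rw [hstep]
    have := ih (s := (pvStep1 (s, g) i).1) (g := (pvStep1 (s, g) i).2)
    simpa using this

theorem pvStep1_nil (g : List (Option Char)) (hg : ∀ o ∈ g, o.isSome) (l : List Nat) :
    l.foldl pvStep1 (([] : List (Option Char)), g) = ([], g) := by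
  induction l with
  | nil => rfl
  | cons i l ih =>
    have hstep : pvStep1 (([] : List (Option Char)), g) i = ([], g) := by
      simp only [pvStep1]
      split
      · rename_i h
        simp only [List.getD_eq_getElem?_getD] at h
        have hge : g.length ≤ i := by
          by_contra hlt
          replace hlt := Nat.lt_of_not_le hlt
          have := hg g[i] (by exact g.getElem_mem hlt)
          simp [List.getElem?_eq_getElem hlt] at h
          rcases Option.isSome_iff_exists.mp this with ⟨a, ha⟩
          simp [ha] at h
        simp [List.set_eq_of_length_le hge]
      · rfl
    rw [List.foldl_cons, hstep, ih]

theorem pvPhase1_fold (g s : List (Option Char)) (hg : ∀ o ∈ g, o.isSome) :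
    (List.range g.length).foldl pvStep1 (s, g) = pvPhase1 s g := by
  induction g generalizing s with
  | nil => cases s <;> rfl
  | cons x g ih =>
    have hx : x.isSome := hg x (by simp)
    have hg' : ∀ o ∈ g, o.isSome := fun o ho => hg o (by simp [ho])
    rcases Option.isSome_iff_exists.mp hx with ⟨xc, hxc⟩
    subst hxc
    rw [List.length_cons, List.range_succ_eq_map, List.foldl_cons]
    cases s with
    | nil =>
      have h0 : pvStep1 (([] : List (Option Char)), some xc :: g) 0 = ([], some xc :: g) := by
        simp [pvStep1]
      rw [h0, pvStep1_nil _ (by intro o ho; exact hg o ho)]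
      rfl
    | cons c s =>
      have h0 : pvStep1 (c :: s, some xc :: g) 0 =
          if some xc = c then ((none :: s : List (Option Char)), (none :: g : List (Option Char)))
          else (c :: s, some xc :: g) := by
        simp only [pvStep1, List.getD_cons_zero]
        split <;> simp_all
      rw [h0]
      by_cases hxcc : some xc = c
      · simp only [if_pos hxcc]
        rw [pvStep1_shift, ih s hg']
        simp [pvPhase1, ← hxcc]
      · simp only [if_neg hxcc]
        rw [pvStep1_shift, ih s hg']
        simp [pvPhase1, hxcc]

theorem pvStep2_shift (G : List (Option Char)) (x : Option Char) (l : List Nat)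
    (sc : List (Option Char) × Int) :
    (l.map Nat.succ).foldl (pvStep2 (x :: G)) sc = l.foldl (pvStep2 G) sc := by
  induction l generalizing sc with
  | nil => rfl
  | cons i l ih =>
    simp only [List.map_cons, List.foldl_cons]
    have hstep : pvStep2 (x :: G) sc (i + 1) = pvStep2 G sc i := by
      simp [pvStep2]
    rw [hstep, ih]

theorem pvPhase2_fold (g : List (Option Char)) (s : List (Option Char)) (c : Int) :
    (List.range g.length).foldl (pvStep2 g) (s, c) =
      ((pvPhase2 s g).1, c + (pvPhase2 s g).2) := by
  induction g generalizing s c with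
  | nil => simp [pvPhase2]
  | cons x g ih =>
    rw [List.length_cons, List.range_succ_eq_map, List.foldl_cons]
    cases x with
    | none =>
      have h0 : pvStep2 (none :: g) (s, c) 0 = (s, c) := by simp [pvStep2]
      rw [h0, pvStep2_shift, ih]
      rfl
    | some d =>
      by_cases hmem : some d ∈ s
      · rcases h : PySem.List.index? s (some d) with _ | j
        · exact absurd ((PySem.List.index?_eq_none_iff s (some d)).mp h) (by simpa using hmem)
        · have h0 : pvStep2 (some d :: g) (s, c) 0 = (s.set j none, c + 1) := by
            simp only [pvStep2, List.getD_cons_zero, if_pos hmem]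
            rw [h]
          rw [h0, pvStep2_shift, ih]
          simp only [pvPhase2, if_pos hmem, h]
          ring_nf
      · have h0 : pvStep2 (some d :: g) (s, c) 0 = (s, c) := by
          simp [pvStep2, hmem]
        rw [h0, pvStep2_shift, ih]
        have hnone : PySem.List.index? s (some d) = none :=
          (PySem.List.index?_eq_none_iff s (some d)).mpr (by simpa using hmem)
        simp [pvPhase2, hmem]

theorem pvMS_set_none (s : List (Option Char)) (j : Nat) (d : Char)
    (h : PySem.List.index? s (some d) = some j) :
    pvMS (s.set j none) = (pvMS s).erase d := by
  rcases (PySem.List.index?_eq_some_iff s (some d) j).mp h with ⟨pre, suf, hs, hlen, _⟩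
  subst hs
  rw [← hlen]
  have hset : (pre ++ some d :: suf).set pre.length none = pre ++ none :: suf := by
    rw [List.set_append_right _ _ (le_refl _)]
    simp
  rw [hset]
  simp only [pvMS, List.filterMap_append]
  rw [show List.filterMap id (none :: suf) = List.filterMap id suf by simp,
    show List.filterMap id (some d :: suf) = d :: List.filterMap id suf by simp]
  rw [show ((List.filterMap id pre ++ d :: List.filterMap id suf : List Char) : Multiset Char)
        = (List.filterMap id pre : List Char) + (d ::ₘ (List.filterMap id suf : List Char)) by simp]
  rw [Multiset.add_cons, Multiset.erase_cons_head]
  simp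

theorem pv_mem_MS (d : Char) (s : List (Option Char)) : d ∈ pvMS s ↔ some d ∈ s := by
  simp [pvMS, List.mem_filterMap, id]

theorem pvPhase2_card (g : List (Option Char)) (s : List (Option Char)) :
    (pvPhase2 s g).2 = ((pvMS g ∩ pvMS s).card : Int) := by
  induction g generalizing s with
  | nil => simp [pvPhase2, pvMS]
  | cons x g ih =>
    cases x with
    | none =>
      have hms : pvMS (none :: g) = pvMS g := by simp [pvMS]
      simp only [pvPhase2, hms]
      exact ih s
    | some d =>
      have hms : pvMS (some d :: g) = d ::ₘ pvMS g := by
        simp [pvMS]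
      by_cases hmem : some d ∈ s
      · rcases h : PySem.List.index? s (some d) with _ | j
        · exact absurd ((PySem.List.index?_eq_none_iff s (some d)).mp h) (by simpa using hmem)
        · have hd : d ∈ pvMS s := (pv_mem_MS d s).mpr hmem
          simp only [pvPhase2, if_pos hmem, h]
          rw [hms, Multiset.cons_inter_of_pos _ hd, Multiset.card_cons,
            ← pvMS_set_none s j d h, ih]
          push_cast
          ring
      · have hd : d ∉ pvMS s := fun hc => hmem ((pv_mem_MS d s).mp hc)
        simp only [pvPhase2, if_neg hmem]
        rw [hms, Multiset.cons_inter_of_neg _ hd]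
        exact ih s

-- (c ::ₘ m) - (c ::ₘ E) = m - E
theorem pv_cons_sub_cons (c : Char) (m E : Multiset Char) :
    (c ::ₘ m) - (c ::ₘ E) = m - E := by
  ext a
  simp only [Multiset.count_sub, Multiset.count_cons]
  split <;> omega

theorem pvPhase1_len2 (s g : List (Option Char)) : (pvPhase1 s g).2.length = g.length := by
  induction g generalizing s with
  | nil => cases s <;> rfl
  | cons x g ih =>
    cases s with
    | nil => rfl
    | cons c s =>
      simp only [pvPhase1]
      split <;> simp [ih]

theorem pvPhase1_spec (cs gs : List Char) :
    pvMS (pvPhase1 (cs.map some) (gs.map some)).1 = (cs : Multiset Char) - pvEm cs gs ∧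
    pvMS (pvPhase1 (cs.map some) (gs.map some)).2 = (gs : Multiset Char) - pvEm cs gs ∧
    pvEm cs gs ≤ (cs : Multiset Char) ∧ pvEm cs gs ≤ (gs : Multiset Char) := by
  induction cs generalizing gs with
  | nil =>
    cases gs with
    | nil => simp [pvPhase1, pvEm, pvMS]
    | cons x gs =>
      refine ⟨by simp [pvPhase1, pvEm, pvMS], ?_, by simp [pvEm], by simp [pvEm]⟩
      simp [pvPhase1, pvEm, pvMS, List.filterMap_map]
  | cons c cs ih =>
    cases gs with
    | nil => simp [pvPhase1, pvEm, pvMS, List.filterMap_map]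
    | cons x gs =>
      obtain ⟨ih1, ih2, ih3, ih4⟩ := ih gs
      simp only [List.map_cons, pvPhase1, pvEm]
      by_cases hxc : x = c
      · have hsx : (some x : Option Char) = some c := by rw [hxc]
        simp only [if_pos hsx, if_pos hxc]
        have hms1 : pvMS (none :: (pvPhase1 (cs.map some) (gs.map some)).1)
            = pvMS (pvPhase1 (cs.map some) (gs.map some)).1 := by
          simp [pvMS]
        have hms2 : pvMS (none :: (pvPhase1 (cs.map some) (gs.map some)).2)
            = pvMS (pvPhase1 (cs.map some) (gs.map some)).2 := by
          simp [pvMS]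
        refine ⟨?_, ?_, ?_, ?_⟩
        · rw [hms1, ih1, show ((c :: cs : List Char) : Multiset Char) = c ::ₘ (cs : Multiset Char) by simp,
            pv_cons_sub_cons]
        · rw [hms2, ih2, show ((x :: gs : List Char) : Multiset Char) = x ::ₘ (gs : Multiset Char) by simp,
            hxc, pv_cons_sub_cons]
        · rw [show ((c :: cs : List Char) : Multiset Char) = c ::ₘ (cs : Multiset Char) by simp]
          exact Multiset.cons_le_cons c ih3
        · rw [show ((x :: gs : List Char) : Multiset Char) = x ::ₘ (gs : Multiset Char) by simp, hxc]
          exact Multiset.cons_le_cons c ih4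
      · have hsx : (some x : Option Char) ≠ some c := by simpa using hxc
        simp only [if_neg hsx, if_neg hxc]
        have hms1 : pvMS (some c :: (pvPhase1 (cs.map some) (gs.map some)).1)
            = c ::ₘ pvMS (pvPhase1 (cs.map some) (gs.map some)).1 := by
          simp [pvMS]
        have hms2 : pvMS (some x :: (pvPhase1 (cs.map some) (gs.map some)).2)
            = x ::ₘ pvMS (pvPhase1 (cs.map some) (gs.map some)).2 := by
          simp [pvMS]
        refine ⟨?_, ?_, ?_, ?_⟩
        · rw [hms1, ih1, show ((c :: cs : List Char) : Multiset Char) = c ::ₘ (cs : Multiset Char) by simp,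
            pv_cons_sub c ih3]
        · rw [hms2, ih2, show ((x :: gs : List Char) : Multiset Char) = x ::ₘ (gs : Multiset Char) by simp,
            pv_cons_sub x ih4]
        · rw [show ((c :: cs : List Char) : Multiset Char) = c ::ₘ (cs : Multiset Char) by simp]
          exact le_trans ih3 (Multiset.le_cons_self _ _)
        · rw [show ((x :: gs : List Char) : Multiset Char) = x ::ₘ (gs : Multiset Char) by simp]
          exact le_trans ih4 (Multiset.le_cons_self _ _)

theorem pvEm_card (cs gs : List Char) :
    (pvEm cs gs).card = (List.range gs.length).countP (fun i => cs[i]? == gs[i]?) := by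
  induction cs generalizing gs with
  | nil =>
    have : ∀ i ∈ List.range gs.length, ¬ ((([] : List Char)[i]? == gs[i]?) = true) := by
      intro i hi
      have hlt : i < gs.length := List.mem_range.mp hi
      simp [List.getElem?_eq_getElem hlt]
    rw [List.countP_eq_zero.mpr this]
    cases gs <;> rfl
  | cons c cs ih =>
    cases gs with
    | nil => simp [pvEm]
    | cons x gs =>
      have hshift : (List.range gs.length).countP
            (fun i => (c :: cs)[Nat.succ i]? == (x :: gs)[Nat.succ i]?)
          = (List.range gs.length).countP (fun i => cs[i]? == gs[i]?) := by
        apply List.countP_congr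
        intro i _
        simp [Nat.succ_eq_add_one, List.getElem?_cons_succ]
      simp only [pvEm, List.length_cons, List.range_succ_eq_map, List.countP_cons,
        List.countP_map, Function.comp_def]
      rw [hshift]
      by_cases hxc : x = c
      · subst hxc
        simp [ih gs]
      · have : ((c :: cs)[0]? == (x :: gs)[0]?) = false := by
          simp [beq_eq_false_iff_ne]
          exact fun h => hxc h.symm
        simp only [if_neg hxc, this]
        simp [ih gs]

theorem pv_total_eq (cs gs : List Char) :
    (PySem.Set.ofList gs).foldl (fun acc d => acc + ((min (cs.count d) (gs.count d) : Nat) : Int)) 0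
      = ((((gs : Multiset Char)) ∩ (cs : Multiset Char)).card : Int) := by
  rw [PySem.List.foldl_add, zero_add,
    ← List.sum_toFinset _ (PySem.Set.nodup_ofList gs)]
  have hfin : (PySem.Set.ofList gs : List Char).toFinset = gs.toFinset := by
    ext a
    simp [List.mem_toFinset, PySem.Set.mem_ofList]
  rw [hfin]
  have hsub : ((gs : Multiset Char) ∩ (cs : Multiset Char)).toFinset ⊆ gs.toFinset := by
    intro a ha
    rw [Multiset.mem_toFinset] at ha
    simpa [List.mem_toFinset] using (Multiset.mem_inter.mp ha).1
  have hcard : ((gs : Multiset Char) ∩ (cs : Multiset Char)).card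
      = ∑ d ∈ gs.toFinset, min (gs.count d) (cs.count d) := by
    rw [← Multiset.toFinset_sum_count_eq]
    rw [Finset.sum_subset hsub ?hz]
    case hz =>
      intro d _ hd
      rw [Multiset.count_eq_zero.mpr (by simpa [Multiset.mem_toFinset] using hd)]
    exact Finset.sum_congr rfl fun d _ => by simp
  rw [hcard, Nat.cast_sum]
  exact Finset.sum_congr rfl fun d _ => by rw [Nat.min_comm]

-- ===== VERDICT (by name: the statement is the Claim_ definition above) =====
theorem count_partial_spec : Claim_equal_count_partial := by
  intro code guess _ _
  unfold Spec_count_partial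
  by_cases hg : guess.toList = []
  · simp [count_partial, count_partial_alt, hg, PySem.Set.ofList]
  · have hlen : (guess.toList.map some).length ≠ 0 := by simpa using hg
    simp only [count_partial, count_partial_alt, if_neg hlen]
    have hsome : ∀ o ∈ guess.toList.map some, o.isSome := by
      intro o ho
      rcases List.mem_map.mp ho with ⟨a, _, rfl⟩
      rfl
    rw [pv_total_eq, ← pvEm_card]
    rw [pvPhase1_fold _ _ hsome]
    rw [show guess.toList.length
          = (pvPhase1 (code.toList.map some) (guess.toList.map some)).2.length by
        rw [pvPhase1_len2]; simp]
    rw [pvPhase2_fold, zero_add, pvPhase2_card]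
    obtain ⟨h1, h2, h3, h4⟩ := pvPhase1_spec code.toList guess.toList
    rw [h1, h2, pv_sub_inter_sub h4 h3]
    have hE : pvEm code.toList guess.toList
        ≤ (guess.toList : Multiset Char) ∩ (code.toList : Multiset Char) := le_inf h4 h3
    rw [Multiset.card_sub hE]
    have hle : (pvEm code.toList guess.toList).card
        ≤ ((guess.toList : Multiset Char) ∩ (code.toList : Multiset Char)).card :=
      Multiset.card_le_card hE
    exact Nat.cast_sub hle
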